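-- pv_equiv track=rewrite | github.com/IsraelDalcin/PythonExercises | LVL3_ex4.py | count_cows
-- ===== SOURCE A (Python) =====
-- class Vaca:
--     def __init__(self, ano):
--         self.ano = ano
--
-- def count_cows(n):
--     if not isinstance(n, int):
--         return None
--     else:
--         lista_vacas = []
--         lista_vacas.append(Vaca(0))
--         for ano in range(n+1):
--             for vacas in lista_vacas:
--                 if ano - vacas.ano >= 3:
--                     lista_vacas.append(Vaca(ano))
--     return len(lista_vacas)
-- ===== SOURCE B (Python) =====
-- def count_cows(n):
--     if not isinstance(n, int):
--         return None
--     # f(y) = herd size after year y; f(y) = f(y-1) + f(y-3), f(y) = 1 for y < 3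
--     a, b, c = 1, 1, 1  # f(y-3), f(y-2), f(y-1)
--     for _ in range(3, n + 1):
--         a, b, c = b, c, c + a
--     return c
-- ===== Notes on version B (the rewrite author's own statement) =====
-- stated objective: faster
-- what changed: Replaced the per-cow simulation (a growing list scanned each year) by an O(n) dynamic program over the linear recurrence f(y) = f(y-1) + f(y-3) with three rolling variables.
import Mathlib
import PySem

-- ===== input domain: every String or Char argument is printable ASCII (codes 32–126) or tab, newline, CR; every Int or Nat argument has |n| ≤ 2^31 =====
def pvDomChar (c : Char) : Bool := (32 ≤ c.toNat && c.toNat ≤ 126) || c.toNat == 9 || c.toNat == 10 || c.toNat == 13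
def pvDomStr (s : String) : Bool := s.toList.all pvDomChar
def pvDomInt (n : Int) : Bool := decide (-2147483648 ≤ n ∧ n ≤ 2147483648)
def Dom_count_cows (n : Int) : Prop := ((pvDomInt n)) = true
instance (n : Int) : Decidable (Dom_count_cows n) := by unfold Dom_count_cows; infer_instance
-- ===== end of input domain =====

-- B replaces A's per-cow simulation (a list of cows rescanned and extended every year)
-- by a dynamic program over the recurrence f(y) = f(y-1) + f(y-3); objective: faster.

-- ===== PORT A =====
-- Python's `for vacas in lista_vacas:` iterates by index over a list that grows while
-- being iterated; cows appended during the scan are reached later in the same scan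
-- (they are born this year, so the age test fails on them). We transcribe that loop
-- literally as recursion on the current index into the current list.
def pvInner (ano : Int) (lista : List Int) (i : Nat) : List Int :=
  if h : i < lista.length then
    if 3 ≤ ano - lista[i] then pvInner ano (lista ++ [ano]) (i + 1)
    else pvInner ano lista (i + 1)
  else lista
termination_by (((lista.drop i).countP (fun b => decide (3 ≤ ano - b))), lista.length - i)
decreasing_by
  · apply Prod.Lex.left
    have hd : lista.drop i = lista[i] :: lista.drop (i + 1) :=
      (List.getElem_cons_drop h).symm
    have hd2 : (lista ++ [ano]).drop (i + 1) = lista.drop (i + 1) ++ [ano] := by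
      rw [List.drop_append_of_le_length (by omega)]
    have hano : (decide (3 ≤ ano - ano)) = false := decide_eq_false (by omega)
    have hcb : (decide (3 ≤ ano - lista[i])) = true := decide_eq_true (by assumption)
    rw [hd2, List.countP_append, List.countP_singleton, hd, List.countP_cons, hcb]
    simp only [hano]
    simp
  · apply Prod.Lex.right'
    · have hd : lista.drop i = lista[i] :: lista.drop (i + 1) :=
        (List.getElem_cons_drop h).symm
      have hcb : (decide (3 ≤ ano - lista[i])) = false := decide_eq_false (by assumption)
      rw [hd, List.countP_cons, hcb]
      simp
    · omega

def count_cows (n : Int) : Int :=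
  -- lista_vacas = []; lista_vacas.append(Vaca(0)); each Vaca is represented by its birth year
  (((PySem.List.pyRange 0 (n + 1) 1).foldl (fun l ano => pvInner ano l 0) ([] ++ [0])).length : Int)

-- ===== PORT B =====
def count_cows_alt (n : Int) : Int :=
  ((PySem.List.pyRange 3 (n + 1) 1).foldl
    (fun (t : Int × Int × Int) _ => (t.2.1, t.2.2, t.2.2 + t.1)) (1, 1, 1)).2.2

-- ===== PRECONDITION & SPEC =====
def Spec_count_cows (n : Int) (out : Int) : Prop := out = count_cows_alt n
instance (n : Int) (out : Int) : Decidable (Spec_count_cows n out) := by unfold Spec_count_cows; infer_instance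

-- ===== CLAIM (what is proved, stated in full; the proofs are below) =====
def Claim_equal_count_cows : Prop := ∀ (n : Int), Dom_count_cows n → Spec_count_cows n (count_cows n)

-- ===== LEMMAS AND PROOFS =====

-- pvInner appends one copy of `ano` for every not-yet-visited cow old enough to breed
theorem pvInner_eq (ano : Int) (lista : List Int) (i : Nat) :
    pvInner ano lista i =
      lista ++ List.replicate ((lista.drop i).countP (fun b => decide (3 ≤ ano - b))) ano := by
  fun_induction pvInner ano lista i with
  | case1 lista i h hc ih =>
    have hd : lista.drop i = lista[i] :: lista.drop (i + 1) :=
      (List.getElem_cons_drop h).symm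
    have hd2 : (lista ++ [ano]).drop (i + 1) = lista.drop (i + 1) ++ [ano] := by
      rw [List.drop_append_of_le_length (by omega)]
    have hano : (decide (3 ≤ ano - ano)) = false := decide_eq_false (by omega)
    have hcb : (decide (3 ≤ ano - lista[i])) = true := decide_eq_true hc
    rw [ih, hd2, List.countP_append, List.countP_singleton, hd, List.countP_cons, hcb]
    simp only [hano]
    simp [List.replicate_succ, List.append_assoc]
  | case2 lista i h hc ih =>
    have hd : lista.drop i = lista[i] :: lista.drop (i + 1) :=
      (List.getElem_cons_drop h).symm
    have hcb : (decide (3 ≤ ano - lista[i])) = false := decide_eq_false hc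
    rw [ih, hd, List.countP_cons, hcb]
    simp
  | case3 lista i h =>
    have : lista.drop i = [] := List.drop_eq_nil_of_le (by omega)
    simp [this]

-- the list after processing years 0 .. k-1
def Lrec : Nat → List Int
  | 0 => [0]
  | k + 1 => pvInner (k : Int) (Lrec k) 0

-- B's rolling triple after k loop iterations
def Trec : Nat → Int × Int × Int
  | 0 => (1, 1, 1)
  | k + 1 => ((Trec k).2.1, (Trec k).2.2, (Trec k).2.2 + (Trec k).1)

theorem foldA (k : Nat) :
    (PySem.List.pyRange 0 (k : Int) 1).foldl (fun l ano => pvInner ano l 0) [0] = Lrec k := by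
  induction k with
  | zero => simp [PySem.List.pyRange_one_eq_nil, Lrec]
  | succ k ih =>
    have h1 : ((k + 1 : Nat) : Int) = (k : Int) + 1 := by push_cast; ring
    rw [Lrec, ← ih, h1, PySem.List.pyRange_one_succ_right (by omega), List.foldl_append]
    simp

theorem foldB (k : Nat) :
    (PySem.List.pyRange 3 (3 + (k : Int)) 1).foldl
      (fun (t : Int × Int × Int) _ => (t.2.1, t.2.2, t.2.2 + t.1)) (1, 1, 1) = Trec k := by
  induction k with
  | zero => simp [PySem.List.pyRange_one_eq_nil, Trec]
  | succ k ih =>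
    have h3 : (3 : Int) + ((k + 1 : Nat) : Int) = (3 + (k : Int)) + 1 := by push_cast; ring
    rw [h3, PySem.List.pyRange_one_succ_right (by omega), List.foldl_append, ih]
    simp [Trec]

def cnt (l : List Int) (m : Int) : Nat := l.countP (fun b => decide (b ≤ m))

theorem cnt_append_replicate (l : List Int) (m y : Int) (r : Nat) :
    cnt (l ++ List.replicate r y) m = cnt l m + if y ≤ m then r else 0 := by
  unfold cnt
  rw [List.countP_append]
  induction r with
  | zero => simp
  | succ r ih =>
    rw [List.replicate_succ, List.countP_cons]
    split_ifs at ih ⊢ <;> simp_all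

theorem cnt_eq_length (l : List Int) (m : Int) (h : ∀ b ∈ l, b ≤ m) : cnt l m = l.length := by
  unfold cnt
  rw [List.countP_eq_length]
  intro b hb; simpa using h b hb

-- the age test `ano - b >= 3` counts exactly the cows born at or before year ano - 3
theorem countP_age (l : List Int) (y : Int) :
    l.countP (fun b => decide (3 ≤ y - b)) = cnt l (y - 3) := by
  unfold cnt
  apply List.countP_congr
  intro b _
  simp only [decide_eq_true_eq]
  omega

theorem Lrec_step (k : Nat) :
    Lrec (k + 1) = Lrec k ++ List.replicate (cnt (Lrec k) ((k : Int) - 3)) (k : Int) := by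
  rw [Lrec, pvInner_eq]
  simp [countP_age]

theorem Lrec_three : Lrec 1 = [0] ∧ Lrec 2 = [0] ∧ Lrec 3 = [0] := by
  have h1 : Lrec 1 = [0] := by
    rw [show (1 : Nat) = 0 + 1 from rfl, Lrec_step]
    norm_num [Lrec]; decide
  have h2 : Lrec 2 = [0] := by
    rw [show (2 : Nat) = 1 + 1 from rfl, Lrec_step, h1]
    norm_num; decide
  have h3 : Lrec 3 = [0] := by
    rw [show (3 : Nat) = 2 + 1 from rfl, Lrec_step, h2]
    norm_num; decide
  exact ⟨h1, h2, h3⟩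

-- main invariant: after years 0..k+2 the herd list realises B's rolling triple
theorem invariant (k : Nat) :
    (∀ b ∈ Lrec (k + 3), b ≤ (k : Int) + 2) ∧
    ((cnt (Lrec (k + 3)) (k : Int) : Int), (cnt (Lrec (k + 3)) ((k : Int) + 1) : Int),
      ((Lrec (k + 3)).length : Int)) = Trec k := by
  induction k with
  | zero =>
    rw [show (0 + 3 : Nat) = 3 from rfl, Lrec_three.2.2]
    constructor
    · intro b hb; simp at hb; omega
    · decide
  | succ k ih =>
    obtain ⟨hbd, htr⟩ := ih
    have hc0 : (cnt (Lrec (k + 3)) (k : Int) : Int) = (Trec k).1 := congrArg Prod.fst htr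
    have hc1 : (cnt (Lrec (k + 3)) ((k : Int) + 1) : Int) = (Trec k).2.1 :=
      congrArg Prod.fst (congrArg Prod.snd htr)
    have hc2 : (((Lrec (k + 3)).length : Int)) = (Trec k).2.2 :=
      congrArg Prod.snd (congrArg Prod.snd htr)
    have hstep : Lrec (k + 1 + 3) =
        Lrec (k + 3) ++ List.replicate (cnt (Lrec (k + 3)) (k : Int)) ((k : Int) + 3) := by
      have h1 : k + 1 + 3 = (k + 3) + 1 := by omega
      have h2 : ((k + 3 : Nat) : Int) = (k : Int) + 3 := by push_cast; ring
      have h3 : (k : Int) + 3 - 3 = (k : Int) := by ring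
      rw [h1, Lrec_step, h2, h3]
    constructor
    · intro b hb
      rw [hstep] at hb
      rcases List.mem_append.mp hb with h | h
      · have := hbd b h; push_cast; omega
      · have := List.eq_of_mem_replicate h; push_cast; omega
    · rw [hstep]
      have e0 : cnt (Lrec (k + 3) ++ List.replicate (cnt (Lrec (k + 3)) (k : Int)) ((k : Int) + 3))
          ((k + 1 : Nat) : Int) = cnt (Lrec (k + 3)) ((k : Int) + 1) := by
        rw [cnt_append_replicate,
          if_neg (by push_cast; omega : ¬ ((k : Int) + 3 ≤ ((k + 1 : Nat) : Int)))]
        push_cast; ring_nf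
      have e1 : cnt (Lrec (k + 3) ++ List.replicate (cnt (Lrec (k + 3)) (k : Int)) ((k : Int) + 3))
          (((k + 1 : Nat) : Int) + 1) = (Lrec (k + 3)).length := by
        rw [cnt_append_replicate,
          if_neg (by push_cast; omega : ¬ ((k : Int) + 3 ≤ ((k + 1 : Nat) : Int) + 1)),
          cnt_eq_length _ _ (by intro b hb; have := hbd b hb; push_cast; omega)]
        ring
      rw [e0, e1]
      simp only [List.length_append, List.length_replicate, Trec]
      rw [← hc0, ← hc1, ← hc2]
      push_cast
      ring_nf

-- ===== VERDICT (by name: the statement is the Claim_ definition above) =====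
set_option maxRecDepth 8000 in
theorem count_cows_spec : Claim_equal_count_cows := by
  unfold Claim_equal_count_cows Spec_count_cows
  intro n hdom
  clear hdom
  unfold count_cows count_cows_alt
  simp only [List.nil_append]
  by_cases hn : n < 0
  · rw [PySem.List.pyRange_one_eq_nil (by omega), PySem.List.pyRange_one_eq_nil (by omega)]
    simp
  · rw [not_lt] at hn
    obtain ⟨m, rfl⟩ : ∃ m : Nat, n = (m : Int) := ⟨n.toNat, (Int.toNat_of_nonneg hn).symm⟩
    have hA : ((m : Int) + 1) = ((m + 1 : Nat) : Int) := by push_cast; ring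
    rw [hA]
    rw [foldA]
    match m with
    | 0 =>
      rw [PySem.List.pyRange_one_eq_nil (by norm_num)]
      simp [Lrec_three.1]
    | 1 =>
      rw [PySem.List.pyRange_one_eq_nil (by norm_num)]
      simp [Lrec_three.2.1]
    | (k + 2) =>
      have hB : (((k + 2 + 1 : Nat) : Int)) = 3 + (k : Int) := by push_cast; ring
      rw [hB, foldB]
      have h1 : k + 2 + 1 = k + 3 := by omega
      rw [h1]
      simpa using congrArg (fun t => t.2.2) (invariant k).2
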